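-- pv_equiv track=rewrite | github.com/M1000010/app_ord_v3.0 | app ord 22mary/appli m/app.py | no_idle
-- ===== SOURCE A (Python) =====
-- def no_idle(schedule, num_machines):
--     # On part du dernier job et on ajuste les horaires si nécessaire
--     for machine_idx in range(num_machines):
--         for job_idx in range(1, len(schedule)):  # On commence par le deuxième job
--             prev_finish_time = schedule[job_idx - 1][machine_idx][1]  # Fin du job précédent
--             current_start_time = schedule[job_idx][machine_idx][0]  # Début du job actuel
--
--             # Si la différence entre la fin du job précédent et le début du job actuel est > 0
--             # Cela signifie qu'il y a un idle (temps d'inactivité)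
--             if current_start_time > prev_finish_time:
--                 # Déplacer le job actuel pour qu'il commence immédiatement après le précédent
--                 schedule[job_idx][machine_idx] = (
--                     prev_finish_time, prev_finish_time + (schedule[job_idx][machine_idx][1] - schedule[job_idx][machine_idx][0])
--                 )
--
--                 # Réajuster les jobs suivants sur cette machine
--                 for next_job_idx in range(job_idx + 1, len(schedule)):
--                     schedule[next_job_idx][machine_idx] = (
--                         schedule[next_job_idx - 1][machine_idx][1],  # Commence après le job précédent
--                         schedule[next_job_idx - 1][machine_idx][1] + (schedule[next_job_idx][machine_idx][1] - schedule[next_job_idx][machine_idx][0])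
--                     )
--     return schedule
-- ===== SOURCE B (Python) =====
-- def no_idle(schedule, num_machines):
--     # Return-value equivalent to A; builds fresh row lists instead of mutating in place.
--     if len(schedule) <= 1:
--         return schedule
--     cols = []
--     for m in range(num_machines):
--         new_col = []
--         prev_end = 0
--         shifting = False
--         for s, e in (row[m] for row in schedule):
--             if new_col and (shifting or s > prev_end):
--                 shifting = True
--                 s, e = prev_end, prev_end + (e - s)
--             new_col.append((s, e))
--             prev_end = e
--         cols.append(new_col)
--     k = len(cols)
--     return [[cols[m][i] for m in range(k)] + row[k:] for i, row in enumerate(schedule)]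
-- ===== Notes on version B (the rewrite author's own statement) =====
-- stated objective: alternative
-- what changed: Replaces A's per-machine index loop with a once-firing inner readjust loop over the mutated nested lists by a single stateful forward pass per machine column (prev_finish/shifting flag) that rebuilds the schedule functionally; return value is identical, but B does not mutate the input in place.
import Mathlib
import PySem

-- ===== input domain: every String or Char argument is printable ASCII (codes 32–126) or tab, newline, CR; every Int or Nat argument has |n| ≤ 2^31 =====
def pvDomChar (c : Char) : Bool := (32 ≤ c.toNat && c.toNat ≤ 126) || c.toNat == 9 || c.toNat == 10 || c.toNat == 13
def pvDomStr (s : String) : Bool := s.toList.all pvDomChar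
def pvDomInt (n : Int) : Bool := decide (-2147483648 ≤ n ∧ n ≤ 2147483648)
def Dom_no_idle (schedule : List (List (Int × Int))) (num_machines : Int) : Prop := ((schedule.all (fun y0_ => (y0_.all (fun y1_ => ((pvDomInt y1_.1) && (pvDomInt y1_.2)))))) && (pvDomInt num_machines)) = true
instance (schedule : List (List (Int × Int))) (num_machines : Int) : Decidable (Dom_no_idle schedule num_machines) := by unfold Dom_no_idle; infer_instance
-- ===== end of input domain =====

-- B changes the decomposition: one stateful forward pass per machine column, rebuilt functionally
-- (A mutates `schedule`'s rows in place and returns the same object; B returns fresh rows —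
-- the equivalence proved here is about the RETURN value only).

-- ===== PORT A =====
-- A-side helpers: schedule[j][m] read, schedule[j][m] = v write (total forms; in range under Pre_)
def pvGet2 (sch : List (List (Int × Int))) (j m : Int) : Int × Int :=
  PySem.List.pyGetD (PySem.List.pyGetD sch j []) m (0, 0)

def pvSet2 (sch : List (List (Int × Int))) (j m : Int) (v : Int × Int) : List (List (Int × Int)) :=
  PySem.List.pySetD sch j (PySem.List.pySetD (PySem.List.pyGetD sch j []) m v)

-- the readjust loop body: schedule[k] gets (prev end, prev end + duration)
def pvFixBody (m : Int) (sch : List (List (Int × Int))) (k : Int) : List (List (Int × Int)) :=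
  pvSet2 sch k m
    ((pvGet2 sch (k - 1) m).2,
     (pvGet2 sch (k - 1) m).2 + ((pvGet2 sch k m).2 - (pvGet2 sch k m).1))

-- the body of `for job_idx in range(1, len(schedule))`
def pvJobBody (m : Int) (sch : List (List (Int × Int))) (j : Int) : List (List (Int × Int)) :=
  if (pvGet2 sch j m).1 > (pvGet2 sch (j - 1) m).2 then
    let sch1 := pvSet2 sch j m
      ((pvGet2 sch (j - 1) m).2,
       (pvGet2 sch (j - 1) m).2 + ((pvGet2 sch j m).2 - (pvGet2 sch j m).1))
    (PySem.List.pyRange (j + 1) (sch1.length : Int) 1).foldl (pvFixBody m) sch1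
  else sch

-- the body of `for machine_idx in range(num_machines)`
def pvMachBody (sch : List (List (Int × Int))) (m : Int) : List (List (Int × Int)) :=
  (PySem.List.pyRange 1 (sch.length : Int) 1).foldl (pvJobBody m) sch

def no_idle (schedule : List (List (Int × Int))) (num_machines : Int) : List (List (Int × Int)) :=
  (PySem.List.pyRange 0 num_machines 1).foldl pvMachBody schedule

-- ===== PORT B =====
-- one forward pass over a column: state (new_col, prev_end, shifting)
def pvProcStep (acc : List (Int × Int) × Int × Bool) (se : Int × Int) :
    List (Int × Int) × Int × Bool :=
  if acc.1 ≠ [] ∧ (acc.2.2 = true ∨ se.1 > acc.2.1) then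
    (acc.1 ++ [(acc.2.1, acc.2.1 + (se.2 - se.1))], acc.2.1 + (se.2 - se.1), true)
  else
    (acc.1 ++ [se], se.2, acc.2.2)

def pvProcCol (col : List (Int × Int)) : List (Int × Int) :=
  (col.foldl pvProcStep ([], 0, false)).1

def no_idle_alt (schedule : List (List (Int × Int))) (num_machines : Int) :
    List (List (Int × Int)) :=
  if schedule.length ≤ 1 then schedule
  else
    let cols := (PySem.List.pyRange 0 num_machines 1).map (fun m =>
      pvProcCol (schedule.map (fun row => PySem.List.pyGetD row m (0, 0))))
    (PySem.List.enumerate schedule).map (fun p =>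
      (PySem.List.pyRange 0 (cols.length : Int) 1).map (fun m =>
        PySem.List.pyGetD (PySem.List.pyGetD cols m []) p.1 (0, 0))
      ++ PySem.List.slice p.2 (some (cols.length : Int)) none)

-- ===== PRECONDITION & SPEC =====
-- Pre_ excludes exactly the inputs where Python A raises IndexError: at least two jobs, a
-- positive machine count, and some row shorter than num_machines.
def Pre_no_idle (schedule : List (List (Int × Int))) (num_machines : Int) : Prop :=
  2 ≤ schedule.length → 0 < num_machines →
    ∀ row ∈ schedule, num_machines ≤ (row.length : Int)
instance (schedule : List (List (Int × Int))) (num_machines : Int) :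
    Decidable (Pre_no_idle schedule num_machines) := by unfold Pre_no_idle; infer_instance

def pvWitness_no_idle : (List (List (Int × Int))) × Int :=
  ([[(0, 1), (0, 2)], [(3, 4), (1, 2)]], 2)

def Spec_no_idle (schedule : List (List (Int × Int))) (num_machines : Int) (out : List (List (Int × Int))) : Prop := out = no_idle_alt schedule num_machines
instance (schedule : List (List (Int × Int))) (num_machines : Int) (out : List (List (Int × Int))) : Decidable (Spec_no_idle schedule num_machines out) := by unfold Spec_no_idle; infer_instance

-- ===== CLAIM (what is proved, stated in full; the proofs are below) =====
def Claim_equal_no_idle : Prop := ∀ (schedule : List (List (Int × Int))) (num_machines : Int), Dom_no_idle schedule num_machines → Pre_no_idle schedule num_machines → Spec_no_idle schedule num_machines (no_idle schedule num_machines)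

-- ===== LEMMAS AND PROOFS =====

-- ---- the common per-column specification ----
def chainFrom (p : Int) : List (Int × Int) → List (Int × Int)
  | [] => []
  | se :: t => (p, p + (se.2 - se.1)) :: chainFrom (p + (se.2 - se.1)) t

def scanCol (p : Int) : List (Int × Int) → List (Int × Int)
  | [] => []
  | se :: t => if se.1 > p then chainFrom p (se :: t) else se :: scanCol se.2 t

def specCol : List (Int × Int) → List (Int × Int)
  | [] => []
  | h :: t => h :: scanCol h.2 t

lemma scanCol_cons_pos (p : Int) (se : Int × Int) (t : List (Int × Int)) (h : se.1 > p) :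
    scanCol p (se :: t) = chainFrom p (se :: t) := by simp [scanCol, h]

lemma scanCol_cons_neg (p : Int) (se : Int × Int) (t : List (Int × Int)) (h : ¬ se.1 > p) :
    scanCol p (se :: t) = se :: scanCol se.2 t := by simp [scanCol, h]

-- ---- Nat-indexed one-column version of A's loops ----
def stepFix (c : List (Int × Int)) (k : Nat) : List (Int × Int) :=
  c.set k ((c.getD (k - 1) (0, 0)).2,
           (c.getD (k - 1) (0, 0)).2 + ((c.getD k (0, 0)).2 - (c.getD k (0, 0)).1))

def stepJob (n : Nat) (c : List (Int × Int)) (j : Nat) : List (Int × Int) :=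
  if (c.getD j (0, 0)).1 > (c.getD (j - 1) (0, 0)).2 then
    (List.range' (j + 1) (n - (j + 1))).foldl stepFix
      (c.set j ((c.getD (j - 1) (0, 0)).2,
                (c.getD (j - 1) (0, 0)).2 + ((c.getD j (0, 0)).2 - (c.getD j (0, 0)).1)))
  else c

def colOf (sch : List (List (Int × Int))) (m : Nat) : List (Int × Int) :=
  sch.map (fun row => row.getD m (0, 0))

def writeColN (sch : List (List (Int × Int))) (m : Nat) (c : List (Int × Int)) :
    List (List (Int × Int)) :=
  List.zipWith (fun row v => row.set m v) sch c

def colG (sch : List (List (Int × Int))) (m : Nat) : List (List (Int × Int)) :=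
  writeColN sch m (specCol (colOf sch m))

-- ---- length lemmas ----
lemma length_chainFrom (p : Int) (t : List (Int × Int)) : (chainFrom p t).length = t.length := by
  induction t generalizing p with
  | nil => rfl
  | cons se t ih => simp [chainFrom, ih]

lemma length_scanCol (p : Int) (t : List (Int × Int)) : (scanCol p t).length = t.length := by
  induction t generalizing p with
  | nil => rfl
  | cons se t ih => by_cases h : se.1 > p <;> simp [scanCol, h, length_chainFrom, ih]

lemma length_specCol (c : List (Int × Int)) : (specCol c).length = c.length := by
  cases c with
  | nil => rfl
  | cons h t => simp [specCol, length_scanCol]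

lemma length_foldl_stepFix (ks : List Nat) (c : List (Int × Int)) :
    (ks.foldl stepFix c).length = c.length := by
  induction ks generalizing c with
  | nil => rfl
  | cons k ks ih => simp [List.foldl_cons, ih, stepFix]

lemma length_stepJob (n : Nat) (c : List (Int × Int)) (j : Nat) :
    (stepJob n c j).length = c.length := by
  unfold stepJob
  split
  · simp [length_foldl_stepFix]
  · rfl

-- ---- B's fold computes specCol ----
lemma procStep_go_true (t : List (Int × Int)) (out : List (Int × Int)) (p : Int)
    (h : out ≠ []) : (t.foldl pvProcStep (out, p, true)).1 = out ++ chainFrom p t := by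
  induction t generalizing out p with
  | nil => simp [chainFrom]
  | cons se t ih =>
    simp only [List.foldl_cons, pvProcStep]
    rw [if_pos ⟨h, Or.inl trivial⟩]
    rw [ih _ _ (by simp)]
    simp [chainFrom]

lemma procStep_go_false (t : List (Int × Int)) (out : List (Int × Int)) (p : Int)
    (h : out ≠ []) : (t.foldl pvProcStep (out, p, false)).1 = out ++ scanCol p t := by
  induction t generalizing out p with
  | nil => simp [scanCol]
  | cons se t ih =>
    by_cases hgt : se.1 > p
    · simp only [List.foldl_cons, pvProcStep]
      rw [if_pos ⟨h, Or.inr hgt⟩]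
      rw [procStep_go_true _ _ _ (by simp)]
      simp [scanCol, hgt, chainFrom]
    · simp only [List.foldl_cons, pvProcStep]
      rw [if_neg (by simp [h, hgt])]
      rw [ih _ _ (by simp)]
      simp [scanCol, hgt]

lemma procCol_eq_specCol (col : List (Int × Int)) : pvProcCol col = specCol col := by
  cases col with
  | nil => rfl
  | cons h t =>
    unfold pvProcCol
    simp only [List.foldl_cons, pvProcStep]
    rw [if_neg (by simp)]
    simp only [List.nil_append]
    rw [procStep_go_false _ _ _ (by simp)]
    simp [specCol]

-- ---- A's inner readjust loop chains the tail ----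
lemma foldl_stepFix_chain (cnt : Nat) : ∀ (k : Nat) (c : List (Int × Int)), 1 ≤ k →
    k + cnt = c.length →
    (List.range' k cnt).foldl stepFix c
      = c.take k ++ chainFrom ((c.getD (k - 1) (0, 0)).2) (c.drop k) := by
  induction cnt with
  | zero =>
    intro k c hk hlen
    have h1 : c.length ≤ k := by omega
    rw [List.range'_zero, List.foldl_nil, List.take_of_length_le h1,
      List.drop_eq_nil_of_le h1]
    simp [chainFrom]
  | succ cnt ih =>
    intro k c hk hlen
    have hkc : k < c.length := by omega
    set v : Int × Int := ((c.getD (k - 1) (0, 0)).2,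
      (c.getD (k - 1) (0, 0)).2 + ((c.getD k (0, 0)).2 - (c.getD k (0, 0)).1)) with hv
    have hsplit : c.set k v = c.take k ++ v :: c.drop (k + 1) := by
      rw [List.set_eq_take_append_cons_drop]; simp [hkc]
    have hgetk : (c.set k v).getD k (0, 0) = v := by
      simp [List.getD_eq_getElem?_getD, List.getElem?_set_self hkc]
    rw [List.range'_succ, List.foldl_cons]
    show (List.range' (k + 1) cnt).foldl stepFix (stepFix c k) = _
    rw [show stepFix c k = c.set k v from rfl]
    rw [ih (k + 1) (c.set k v) (by omega) (by simp; omega)]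
    simp only [Nat.add_sub_cancel]
    rw [hgetk]
    have htake : (c.set k v).take (k + 1) = c.take k ++ [v] := by
      rw [hsplit, show k + 1 = (c.take k).length + 1 by simp [Nat.le_of_lt hkc],
        List.take_append]
      simp
    have hdrop : (c.set k v).drop (k + 1) = c.drop (k + 1) := by
      rw [hsplit, show k + 1 = (c.take k).length + 1 by simp [Nat.le_of_lt hkc],
        List.drop_append]
      simp
    rw [htake, hdrop]
    have hdk : c.drop k = c.getD k (0, 0) :: c.drop (k + 1) := by
      rw [List.getD_eq_getElem c (0,0) hkc, List.drop_eq_getElem_cons hkc]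
    rw [hdk]
    simp [chainFrom, hv]

-- ---- gap-free lists are fixed points of A's job loop ----
def noGapFrom (c : List (Int × Int)) (k : Nat) : Prop :=
  ∀ j, k ≤ j → j < c.length → (c.getD j (0, 0)).1 ≤ (c.getD (j - 1) (0, 0)).2

lemma getD_append_left {α : Type} (d : α) (a b : List α) (j : Nat) (h : j < a.length) :
    (a ++ b).getD j d = a.getD j d := by
  simp [List.getD_eq_getElem?_getD, List.getElem?_append_left h]

lemma getD_append_length {α : Type} (d : α) (a b : List α) (x : α) :
    (a ++ x :: b).getD a.length d = x := by
  simp [List.getD_eq_getElem?_getD]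

lemma noGapFrom_mono (c : List (Int × Int)) (k k' : Nat) (h : k ≤ k')
    (hg : noGapFrom c k) : noGapFrom c k' := fun j hj1 hj2 => hg j (by omega) hj2

lemma chainFrom_noGap (t : List (Int × Int)) : ∀ (pre : List (Int × Int)) (p : Int)
    (h : pre ≠ []), (pre.getLast h).2 = p →
    noGapFrom (pre ++ chainFrom p t) pre.length := by
  induction t with
  | nil =>
    intro pre p h hp j hj1 hj2
    simp only [chainFrom, List.append_nil] at hj2
    omega
  | cons se t ih =>
    intro pre p h hp j hj1 hj2
    have hlast : ((pre ++ [((p : Int), p + (se.2 - se.1))]).getLast (by simp)).2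
        = p + (se.2 - se.1) := by
      simp
    have ihh := ih (pre ++ [(p, p + (se.2 - se.1))]) (p + (se.2 - se.1)) (by simp) hlast
    rcases Nat.eq_or_lt_of_le hj1 with heq | hlt
    · -- j = pre.length : boundary
      subst heq
      rw [show chainFrom p (se :: t) = (p, p + (se.2 - se.1)) :: chainFrom (p + (se.2 - se.1)) t
          from rfl]
      rw [getD_append_length]
      have hpre1 : pre.length - 1 < pre.length := by
        cases pre with
        | nil => exact absurd rfl h
        | cons a l => simp
      rw [getD_append_left _ _ _ _ hpre1]
      have : pre.getD (pre.length - 1) (0, 0) = pre.getLast h := by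
        rw [List.getLast_eq_getElem, List.getD_eq_getElem _ _ hpre1]
      rw [this, hp]
    · -- j > pre.length : inside the chained tail
      have := ihh j (by simp; omega) (by simpa [chainFrom] using hj2)
      simpa [chainFrom] using this

lemma foldl_stepJob_of_noGap (cnt : Nat) : ∀ (k : Nat) (c : List (Int × Int)), 1 ≤ k →
    k + cnt ≤ c.length → noGapFrom c k →
    (List.range' k cnt).foldl (stepJob c.length) c = c := by
  induction cnt with
  | zero => intro k c _ _ _; simp
  | succ cnt ih =>
    intro k c hk hlen hg
    have hkc : k < c.length := by omega
    rw [List.range'_succ, List.foldl_cons]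
    have hstep : stepJob c.length c k = c := by
      unfold stepJob
      rw [if_neg]
      exact not_lt.mpr (hg k (Nat.le_refl k) hkc)
    rw [hstep]
    exact ih (k + 1) c (by omega) (by omega) (noGapFrom_mono c k (k + 1) (by omega) hg)

-- ---- A's job loop computes scanCol ----
lemma foldl_stepJob_scan (cnt : Nat) : ∀ (k : Nat) (c : List (Int × Int)), 1 ≤ k →
    k + cnt = c.length →
    (List.range' k cnt).foldl (stepJob c.length) c
      = c.take k ++ scanCol ((c.getD (k - 1) (0, 0)).2) (c.drop k) := by
  induction cnt with
  | zero =>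
    intro k c hk hlen
    have h1 : c.length ≤ k := by omega
    rw [List.range'_zero, List.foldl_nil, List.take_of_length_le h1,
      List.drop_eq_nil_of_le h1]
    simp [scanCol]
  | succ cnt ih =>
    intro k c hk hlen
    have hkc : k < c.length := by omega
    set p : Int := (c.getD (k - 1) (0, 0)).2 with hpdef
    have hdk : c.drop k = c.getD k (0, 0) :: c.drop (k + 1) := by
      rw [List.getD_eq_getElem c (0, 0) hkc, List.drop_eq_getElem_cons hkc]
    rw [List.range'_succ, List.foldl_cons]
    by_cases hgt : (c.getD k (0, 0)).1 > p
    · -- the gap triggers: the readjust loop chains the whole tail, the rest is a no-op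
      set v : Int × Int := (p, p + ((c.getD k (0, 0)).2 - (c.getD k (0, 0)).1)) with hv
      have hsplit : c.set k v = c.take k ++ v :: c.drop (k + 1) := by
        rw [List.set_eq_take_append_cons_drop]; simp [hkc]
      have hgetk : (c.set k v).getD k (0, 0) = v := by
        simp [List.getD_eq_getElem?_getD, List.getElem?_set_self hkc]
      have hstep : stepJob c.length c k
          = c.take k ++ chainFrom p (c.drop k) := by
        unfold stepJob
        rw [if_pos hgt]
        rw [foldl_stepFix_chain (c.length - (k + 1)) (k + 1) (c.set k v)
          (by omega) (by simp; omega)]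
        simp only [Nat.add_sub_cancel]
        rw [hgetk]
        have htake : (c.set k v).take (k + 1) = c.take k ++ [v] := by
          rw [hsplit, show k + 1 = (c.take k).length + 1 by simp [Nat.le_of_lt hkc],
            List.take_append]
          simp
        have hdrop : (c.set k v).drop (k + 1) = c.drop (k + 1) := by
          rw [hsplit, show k + 1 = (c.take k).length + 1 by simp [Nat.le_of_lt hkc],
            List.drop_append]
          simp
        rw [htake, hdrop, hdk]
        simp [chainFrom, hv]
      rw [hstep]
      set c2 : List (Int × Int) := c.take k ++ chainFrom p (c.drop k) with hc2
      have hlen2 : c2.length = c.length := by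
        simp [hc2, length_chainFrom, Nat.le_of_lt hkc]
      have hprelen : (c.take k).length = k := by simp [Nat.le_of_lt hkc]
      have hprene : c.take k ≠ [] := by
        intro hnil
        rw [hnil] at hprelen
        simp at hprelen
        omega
      have hlastpre : ((c.take k).getLast hprene).2 = p := by
        rw [List.getLast_eq_getElem]
        simp only [hprelen]
        rw [hpdef, List.getD_eq_getElem c (0, 0) (by omega : k - 1 < c.length)]
        congr 1
        exact List.getElem_take
      have hng : noGapFrom c2 k := by
        have := chainFrom_noGap (c.drop k) (c.take k) p hprene hlastpre
        rwa [hprelen] at this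
      have : (List.range' (k + 1) cnt).foldl (stepJob c.length) c2 = c2 := by
        rw [show c.length = c2.length from hlen2.symm]
        exact foldl_stepJob_of_noGap cnt (k + 1) c2 (by omega) (by omega)
          (noGapFrom_mono c2 k (k + 1) (by omega) hng)
      rw [this, hc2, hdk, scanCol_cons_pos p _ _ hgt]
    · -- no gap here: this job is kept unchanged
      have hstep : stepJob c.length c k = c := by
        unfold stepJob; rw [if_neg hgt]
      rw [hstep, ih (k + 1) c (by omega) (by omega)]
      simp only [Nat.add_sub_cancel]
      have htake1 : c.take (k + 1) = c.take k ++ [c.getD k (0, 0)] := by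
        rw [List.getD_eq_getElem c (0, 0) hkc]
        exact List.take_succ_eq_append_getElem hkc
      rw [htake1, hdk, scanCol_cons_neg p _ _ hgt]
      simp only [List.append_assoc, List.singleton_append]

-- ---- 2-D simulation: A's machine body acts on one column ----
lemma length_writeColN (sch0 : List (List (Int × Int))) (mm : Nat) (c : List (Int × Int)) :
    (writeColN sch0 mm c).length = min sch0.length c.length := by
  simp [writeColN]

lemma read2 (sch0 : List (List (Int × Int))) (mm : Nat) (c : List (Int × Int)) (j : Nat)
    (hr : ∀ row ∈ sch0, mm < row.length) (hc : c.length = sch0.length) (hj : j < c.length) :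
    pvGet2 (writeColN sch0 mm c) (j : Int) (mm : Int) = c.getD j (0, 0) := by
  have hjw : j < (writeColN sch0 mm c).length := by
    simp [length_writeColN]; omega
  have hjs : j < sch0.length := by omega
  unfold pvGet2
  rw [PySem.List.pyGetD_natCast, PySem.List.pyGetD_natCast]
  rw [List.getD_eq_getElem _ _ hjw]
  unfold writeColN
  rw [List.getElem_zipWith]
  have hmm : mm < (sch0[j]'hjs).length := hr _ (List.getElem_mem hjs)
  rw [List.getD_eq_getElem?_getD, List.getElem?_set_self hmm, Option.getD_some,
    List.getD_eq_getElem _ _ hj]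

lemma write2 (sch0 : List (List (Int × Int))) (mm : Nat) (c : List (Int × Int)) (j : Nat)
    (v : Int × Int) (hc : c.length = sch0.length) (hj : j < c.length) :
    pvSet2 (writeColN sch0 mm c) (j : Int) (mm : Int) v = writeColN sch0 mm (c.set j v) := by
  have hjw : j < (writeColN sch0 mm c).length := by
    simp [length_writeColN]; omega
  have hjs : j < sch0.length := by omega
  unfold pvSet2
  rw [PySem.List.pySetD_natCast, PySem.List.pyGetD_natCast, PySem.List.pySetD_natCast]
  rw [List.getD_eq_getElem _ _ hjw]
  unfold writeColN
  rw [List.getElem_zipWith, List.set_set]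
  apply List.ext_getElem
  · simp
  · intro i h1 h2
    by_cases hij : i = j
    · subst hij
      rw [List.getElem_set_self (by simp; omega), List.getElem_zipWith]
      congr 1
      rw [List.getElem_set_self (by simp; omega)]
    · rw [List.getElem_set_ne (by omega), List.getElem_zipWith, List.getElem_zipWith]
      congr 1
      rw [List.getElem_set_ne (by omega)]

lemma pyRange_cast (k n : Nat) :
    PySem.List.pyRange (k : Int) (n : Int) 1 = (List.range' k (n - k)).map (fun (j : Nat) => (j : Int)) := by
  have h1 : ((n : Int) - (k : Int)).toNat = n - k := by omega
  rw [PySem.List.pyRange_one, h1, List.range'_eq_map_range, List.map_map]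
  exact List.map_congr_left (fun t _ => by simp)

lemma pyRange_one_cast (n : Nat) :
    PySem.List.pyRange 1 (n : Int) 1 = (List.range' 1 (n - 1)).map (fun (j : Nat) => (j : Int)) := by
  have h := pyRange_cast 1 n
  simpa using h

lemma colA_scan (c : List (Int × Int)) (hne : c ≠ []) :
    (List.range' 1 (c.length - 1)).foldl (stepJob c.length) c = specCol c := by
  cases c with
  | nil => exact absurd rfl hne
  | cons h t =>
    have h0 := foldl_stepJob_scan t.length 1 (h :: t) (Nat.le_refl 1) (by simp [Nat.add_comm])
    simpa [specCol, List.getD] using h0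

lemma simFix (sch0 : List (List (Int × Int))) (mm : Nat)
    (hr : ∀ row ∈ sch0, mm < row.length) :
    ∀ (ks : List Nat) (c : List (Int × Int)), c.length = sch0.length →
    (∀ k ∈ ks, 1 ≤ k ∧ k < c.length) →
    (ks.map (fun (j : Nat) => (j : Int))).foldl (pvFixBody (mm : Int)) (writeColN sch0 mm c)
      = writeColN sch0 mm (ks.foldl stepFix c) := by
  intro ks
  induction ks with
  | nil => intro c _ _; rfl
  | cons k ks ih =>
    intro c hc hb
    obtain ⟨hk1, hkc⟩ := hb k (List.mem_cons_self ..)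
    rw [List.map_cons, List.foldl_cons, List.foldl_cons]
    have hcast : (k : Int) - 1 = ((k - 1 : Nat) : Int) := by omega
    have hstep : pvFixBody (mm : Int) (writeColN sch0 mm c) (k : Int)
        = writeColN sch0 mm (stepFix c k) := by
      unfold pvFixBody
      rw [hcast, read2 sch0 mm c (k - 1) hr hc (by omega), read2 sch0 mm c k hr hc hkc,
        write2 sch0 mm c k _ hc hkc]
      rfl
    rw [hstep]
    exact ih (stepFix c k) (by simp [stepFix, hc]) (fun k' hk' => by
      have := hb k' (List.mem_cons_of_mem _ hk')
      simpa [stepFix] using this)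

lemma simJob (sch0 : List (List (Int × Int))) (mm : Nat)
    (hr : ∀ row ∈ sch0, mm < row.length) :
    ∀ (ks : List Nat) (c : List (Int × Int)), c.length = sch0.length →
    (∀ k ∈ ks, 1 ≤ k ∧ k < c.length) →
    (ks.map (fun (j : Nat) => (j : Int))).foldl (pvJobBody (mm : Int)) (writeColN sch0 mm c)
      = writeColN sch0 mm (ks.foldl (stepJob sch0.length) c) := by
  intro ks
  induction ks with
  | nil => intro c _ _; rfl
  | cons j ks ih =>
    intro c hc hb
    obtain ⟨hj1, hjc⟩ := hb j (List.mem_cons_self ..)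
    rw [List.map_cons, List.foldl_cons, List.foldl_cons]
    have hcast : (j : Int) - 1 = ((j - 1 : Nat) : Int) := by omega
    have hstep : pvJobBody (mm : Int) (writeColN sch0 mm c) (j : Int)
        = writeColN sch0 mm (stepJob sch0.length c j) := by
      set v : Int × Int := ((c.getD (j - 1) (0, 0)).2,
        (c.getD (j - 1) (0, 0)).2 + ((c.getD j (0, 0)).2 - (c.getD j (0, 0)).1)) with hv
      unfold pvJobBody stepJob
      rw [hcast, read2 sch0 mm c (j - 1) hr hc (by omega), read2 sch0 mm c j hr hc hjc]
      by_cases hgt : (c.getD j (0, 0)).1 > (c.getD (j - 1) (0, 0)).2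
      · rw [if_pos hgt, if_pos hgt]
        rw [show pvSet2 (writeColN sch0 mm c) (j : Int) (mm : Int) v
            = writeColN sch0 mm (c.set j v) from write2 sch0 mm c j v hc hjc]
        show (PySem.List.pyRange ((j : Int) + 1)
            ((writeColN sch0 mm (c.set j v)).length : Int) 1).foldl
            (pvFixBody (mm : Int)) (writeColN sch0 mm (c.set j v)) = _
        have hlen1 : (writeColN sch0 mm (c.set j v)).length = sch0.length := by
          simp [length_writeColN, hc]
        rw [hlen1]
        have hj1e : (j : Int) + 1 = ((j + 1 : Nat) : Int) := by omega
        rw [hj1e, pyRange_cast (j + 1) sch0.length]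
        rw [simFix sch0 mm hr (List.range' (j + 1) (sch0.length - (j + 1)))
          (c.set j v) (by simp [hc]) (fun k' hk' => by
            rw [List.mem_range'_1] at hk'
            constructor
            · omega
            · simp; omega)]
      · rw [if_neg hgt, if_neg hgt]
    rw [hstep]
    exact ih (stepJob sch0.length c j) (by simp [length_stepJob, hc]) (fun k' hk' => by
      have := hb k' (List.mem_cons_of_mem _ hk')
      simpa [length_stepJob] using this)

lemma writeColN_colOf (sch0 : List (List (Int × Int))) (mm : Nat)
    (hr : ∀ row ∈ sch0, mm < row.length) :
    writeColN sch0 mm (colOf sch0 mm) = sch0 := by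
  apply List.ext_getElem
  · simp [length_writeColN, colOf]
  · intro i h1 h2
    unfold writeColN colOf
    rw [List.getElem_zipWith, List.getElem_map]
    rw [List.getD_eq_getElem _ _ (hr _ (List.getElem_mem h2))]
    exact List.set_getElem_self _

lemma machBody_eq (sch0 : List (List (Int × Int))) (mm : Nat)
    (hr : ∀ row ∈ sch0, mm < row.length) :
    pvMachBody sch0 (mm : Int) = colG sch0 mm := by
  cases hsch : sch0 with
  | nil => simp [pvMachBody, colG, writeColN, PySem.List.pyRange_one_eq_nil]
  | cons r rs =>
    rw [← hsch]
    have hne : sch0 ≠ [] := by rw [hsch]; simp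
    have hn1 : 1 ≤ sch0.length := by rw [hsch]; simp
    unfold pvMachBody
    rw [pyRange_one_cast sch0.length]
    have hsim := simJob sch0 mm hr (List.range' 1 (sch0.length - 1)) (colOf sch0 mm)
      (by simp [colOf]) (fun k' hk' => by
        rw [List.mem_range'_1] at hk'
        constructor
        · omega
        · simp [colOf]; omega)
    rw [writeColN_colOf sch0 mm hr] at hsim
    rw [hsim]
    unfold colG
    congr 1
    have hclen : (colOf sch0 mm).length = sch0.length := by simp [colOf]
    rw [← hclen]
    exact colA_scan (colOf sch0 mm) (by simp [colOf, hsch])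

-- ---- the machine fold, elementwise ----
lemma getD_set_self' {α : Type} (l : List α) (k : Nat) (v : α) (d : α) (h : k < l.length) :
    (l.set k v).getD k d = v := by
  simp [List.getD_eq_getElem?_getD, List.getElem?_set_self h]

lemma getD_set_ne' {α : Type} (l : List α) (k mm : Nat) (v : α) (d : α) (h : mm ≠ k) :
    (l.set k v).getD mm d = l.getD mm d := by
  simp [List.getD_eq_getElem?_getD, List.getElem?_set_ne (fun hh => h hh.symm)]

lemma getD_writeColN (Q : List (List (Int × Int))) (M : Nat) (c : List (Int × Int))
    (i : Nat) (hi : i < Q.length) (hc : c.length = Q.length) :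
    (writeColN Q M c).getD i [] = (Q.getD i []).set M (c.getD i (0, 0)) := by
  unfold writeColN
  rw [List.getD_eq_getElem _ _ (by simp; omega), List.getElem_zipWith,
    List.getD_eq_getElem _ _ hi, List.getD_eq_getElem _ _ (by omega)]

lemma length_colOf (s : List (List (Int × Int))) (m : Nat) : (colOf s m).length = s.length := by
  simp [colOf]

lemma foldG_elem (M : Nat) (sch0 : List (List (Int × Int)))
    (hr : ∀ row ∈ sch0, M ≤ row.length) :
    ((List.range' 0 M).foldl colG sch0).length = sch0.length ∧
    (∀ i, i < sch0.length →
      (((List.range' 0 M).foldl colG sch0).getD i []).length = (sch0.getD i []).length) ∧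
    (∀ i, i < sch0.length → ∀ mm,
      (((List.range' 0 M).foldl colG sch0).getD i []).getD mm (0, 0)
        = if mm < M then (specCol (colOf sch0 mm)).getD i (0, 0)
          else (sch0.getD i []).getD mm (0, 0)) := by
  induction M with
  | zero => simp
  | succ M ih =>
    have hrM : ∀ row ∈ sch0, M ≤ row.length := fun row h => by
      have := hr row h; omega
    obtain ⟨hL, hRL, hE⟩ := ih hrM
    have hconc : List.range' 0 (M + 1) = List.range' 0 M ++ [M] := by
      rw [List.range'_concat]; simp
    rw [hconc, List.foldl_append, List.foldl_cons, List.foldl_nil]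
    set Q : List (List (Int × Int)) := (List.range' 0 M).foldl colG sch0 with hQ
    have hcol : colOf Q M = colOf sch0 M := by
      apply List.ext_getElem
      · simp [length_colOf, hL]
      · intro i h1 h2
        unfold colOf
        rw [List.getElem_map, List.getElem_map]
        rw [← List.getD_eq_getElem Q [] (by simpa [length_colOf, hL] using h1),
          ← List.getD_eq_getElem sch0 [] (by simpa [length_colOf] using h2)]
        have := hE i (by simpa [length_colOf, hL] using h1) M
        rw [if_neg (by omega)] at this
        exact this
    have hspecLen : (specCol (colOf sch0 M)).length = sch0.length := by
      simp [length_specCol, length_colOf]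
    have hrowG : ∀ i, i < sch0.length →
        (colG Q M).getD i [] = (Q.getD i []).set M ((specCol (colOf sch0 M)).getD i (0, 0)) := by
      intro i hi
      unfold colG
      rw [hcol]
      rw [getD_writeColN Q M (specCol (colOf sch0 M)) i (by rw [hL]; exact hi)
        (by rw [hspecLen, hL])]
    refine ⟨by simp [colG, length_writeColN, length_specCol, length_colOf, hL], ?_, ?_⟩
    · intro i hi
      rw [hrowG i hi, List.length_set]
      exact hRL i hi
    · intro i hi mm
      rw [hrowG i hi]
      by_cases hmM : mm = M
      · subst hmM
        have hlen : mm < (Q.getD i []).length := by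
          rw [hRL i hi]
          have := hr (sch0.getD i []) (by
            rw [List.getD_eq_getElem _ _ hi]; exact List.getElem_mem hi)
          omega
        rw [getD_set_self' _ _ _ _ hlen, if_pos (by omega)]
      · rw [getD_set_ne' _ _ _ _ _ hmM, hE i hi mm]
        by_cases hlt : mm < M
        · rw [if_pos hlt, if_pos (by omega)]
        · rw [if_neg hlt, if_neg (by omega)]

lemma pyRange_zero_cast (n : Nat) :
    PySem.List.pyRange 0 (n : Int) 1 = (List.range' 0 n).map (fun (j : Nat) => (j : Int)) := by
  have h := pyRange_cast 0 n
  simpa using h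

lemma map_length_colG (s : List (List (Int × Int))) (k : Nat) :
    (colG s k).map List.length = s.map List.length := by
  apply List.ext_getElem
  · simp [colG, length_writeColN, length_specCol, length_colOf]
  · intro i h1 h2
    rw [List.getElem_map, List.getElem_map]
    unfold colG writeColN
    rw [List.getElem_zipWith]
    simp

lemma foldMach (sch : List (List (Int × Int))) (nm : Int)
    (hr : ∀ row ∈ sch, nm ≤ (row.length : Int)) :
    ∀ (ks : List Nat) (s : List (List (Int × Int))),
    s.map List.length = sch.map List.length → (∀ k ∈ ks, (k : Int) < nm) →
    (ks.map (fun (j : Nat) => (j : Int))).foldl pvMachBody s = ks.foldl colG s := by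
  intro ks
  induction ks with
  | nil => intro s _ _; rfl
  | cons k ks ih =>
    intro s hs hb
    rw [List.map_cons, List.foldl_cons, List.foldl_cons]
    have hrk : ∀ row ∈ s, k < row.length := by
      intro row hrow
      have hmem : (row.length : Nat) ∈ sch.map List.length := by
        rw [← hs]; exact List.mem_map_of_mem hrow
      obtain ⟨r, hrmem, hlen⟩ := List.mem_map.mp hmem
      have h1 := hr r hrmem
      have h2 := hb k (List.mem_cons_self ..)
      omega
    rw [machBody_eq s k hrk]
    exact ih (colG s k) (by rw [map_length_colG, hs])
      (fun k' hk' => hb k' (List.mem_cons_of_mem _ hk'))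

lemma A_eq_foldG (sch : List (List (Int × Int))) (nm : Int) (h0 : 0 < nm)
    (hr : ∀ row ∈ sch, nm ≤ (row.length : Int)) :
    no_idle sch nm = (List.range' 0 nm.toNat).foldl colG sch := by
  unfold no_idle
  rw [show nm = ((nm.toNat : Nat) : Int) by omega, pyRange_zero_cast nm.toNat]
  exact foldMach sch nm hr (List.range' 0 nm.toNat) sch rfl
    (fun k hk => by rw [List.mem_range'_1] at hk; omega)

-- ---- A is the identity on degenerate inputs ----
lemma machBody_small (s : List (List (Int × Int))) (m : Int) (h : s.length ≤ 1) :
    pvMachBody s m = s := by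
  unfold pvMachBody
  rw [PySem.List.pyRange_one_eq_nil (by exact_mod_cast h), List.foldl_nil]

lemma foldl_machBody_small (ms : List Int) (s : List (List (Int × Int))) (h : s.length ≤ 1) :
    ms.foldl pvMachBody s = s := by
  induction ms with
  | nil => rfl
  | cons m ms ih => rw [List.foldl_cons, machBody_small s m h]; exact ih

def pvCols (sch : List (List (Int × Int))) (nm : Int) : List (List (Int × Int)) :=
  (PySem.List.pyRange 0 nm 1).map (fun m =>
    pvProcCol (sch.map (fun row => PySem.List.pyGetD row m (0, 0))))

lemma alt_big (sch : List (List (Int × Int))) (nm : Int) (h : ¬ sch.length ≤ 1) :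
    no_idle_alt sch nm = (PySem.List.enumerate sch).map (fun p =>
      (PySem.List.pyRange 0 ((pvCols sch nm).length : Int) 1).map (fun m =>
        PySem.List.pyGetD (PySem.List.pyGetD (pvCols sch nm) m []) p.1 (0, 0))
      ++ PySem.List.slice p.2 (some ((pvCols sch nm).length : Int)) none) := by
  unfold no_idle_alt
  rw [if_neg h]
  rfl

lemma getD_map_range' {α : Type} (f : Nat → α) (M k : Nat) (d : α) (h : k < M) :
    ((List.range' 0 M).map f).getD k d = f k := by
  rw [List.getD_eq_getElem _ _ (by simp [h])]
  simp

-- ===== VERDICT (by name: the statement is the Claim_ definition above) =====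
theorem no_idle_spec : Claim_equal_no_idle := by
  intro sch nm _ hpre
  unfold Spec_no_idle
  by_cases hsmall : sch.length ≤ 1
  · unfold no_idle no_idle_alt
    rw [if_pos hsmall]
    exact foldl_machBody_small _ _ hsmall
  · have hs2 : 2 ≤ sch.length := by omega
    set M : Nat := nm.toNat with hM
    have hrNat : ∀ row ∈ sch, M ≤ row.length := by
      intro row h
      by_cases h0 : 0 < nm
      · have := hpre hs2 h0 row h; omega
      · omega
    have hA : no_idle sch nm = (List.range' 0 M).foldl colG sch := by
      by_cases h0 : 0 < nm
      · exact A_eq_foldG sch nm h0 (hpre hs2 h0)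
      · have hM0 : M = 0 := by omega
        rw [hM0, List.range'_zero, List.foldl_nil]
        unfold no_idle
        rw [PySem.List.pyRange_one_eq_nil (by omega), List.foldl_nil]
    rw [hA]
    obtain ⟨hL, hRL, hE⟩ := foldG_elem M sch hrNat
    rw [alt_big sch nm hsmall]
    have hcols : pvCols sch nm
        = (List.range' 0 M).map (fun mm => specCol (colOf sch mm)) := by
      unfold pvCols
      by_cases h0 : 0 < nm
      · rw [show nm = ((M : Nat) : Int) by omega, pyRange_zero_cast M, List.map_map]
        apply List.map_congr_left
        intro mm _
        simp only [Function.comp]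
        rw [procCol_eq_specCol]
        congr 1
        unfold colOf
        exact List.map_congr_left (fun row _ => PySem.List.pyGetD_natCast _ _ _)
      · rw [PySem.List.pyRange_one_eq_nil (by omega), show M = 0 by omega]
        simp
    rw [hcols]
    set C : List (List (Int × Int)) := (List.range' 0 M).map (fun mm => specCol (colOf sch mm))
      with hC
    have hClen : C.length = M := by simp [hC]
    rw [hClen]
    apply List.ext_getElem
    · simp [hL]
    · intro i h1 h2
      have hin : i < sch.length := by rwa [hL] at h1
      rw [List.getElem_map, PySem.List.getElem_enumerate]
      simp only [Int.zero_add]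
      have hrow : ((List.range' 0 M).foldl colG sch)[i]
          = ((List.range' 0 M).foldl colG sch).getD i [] := by
        rw [List.getD_eq_getElem _ _ h1]
      rw [hrow]
      have hrlen : (((List.range' 0 M).foldl colG sch).getD i []).length = sch[i].length := by
        rw [hRL i hin, List.getD_eq_getElem _ _ hin]
      have hMle : M ≤ sch[i].length := hrNat _ (List.getElem_mem hin)
      rw [PySem.List.slice_from_natCast]
      apply List.ext_getElem
      · simp only [List.length_append, List.length_map, PySem.List.length_pyRange_one,
          List.length_drop, hrlen]
        omega
      · intro mm hm1 hm2
        by_cases hmm : mm < M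
        · rw [List.getElem_append_left (by simp [PySem.List.length_pyRange_one]; omega)]
          rw [List.getElem_map, PySem.List.getElem_pyRange_one]
          simp only [Int.zero_add]
          rw [PySem.List.pyGetD_natCast, PySem.List.pyGetD_natCast]
          rw [hC, getD_map_range' _ _ _ _ hmm]
          rw [← List.getD_eq_getElem _ (0, 0) hm1, hE i hin mm, if_pos hmm]
        · have hlenfst : ((PySem.List.pyRange 0 (M : Int) 1).map (fun m =>
              PySem.List.pyGetD (PySem.List.pyGetD C m []) (i : Int) (0, 0))).length = M := by
            simp [PySem.List.length_pyRange_one]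
          rw [List.getElem_append_right (by rw [hlenfst]; omega)]
          simp only [hlenfst]
          rw [List.getElem_drop]
          rw [← List.getD_eq_getElem _ (0, 0) hm1, hE i hin mm, if_neg hmm]
          rw [List.getD_eq_getElem _ _ hin, ← List.getD_eq_getElem _ (0, 0)
            (by omega : M + (mm - M) < sch[i].length)]
          congr 1
          omega
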